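-- pv_equiv track=rewrite | github.com/vishnuap/Algorithms | Chapter-03-Arrays/Array-Remove-Range/Array-Remove-Range.py | removeRange
-- ===== SOURCE A (Python) =====
-- def removeRange(arr, start, end):
--     (start, end) = (start, end) if start <= end else (end, start)
--
--     if start < 0 or end > len(arr) - 1:
--         return None
--     else:
--         for i in range(start, end+1):
--             for j in range(start, len(arr) - 1):
--                 arr[j] = arr[j + 1]
--             arr.pop()
--
--         return arr
-- ===== SOURCE B (Python) =====
-- def removeRange(arr, start, end):
--     lo, hi = min(start, end), max(start, end)
--     if lo < 0 or hi >= len(arr):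
--         return None
--     arr[:] = [x for i, x in enumerate(arr) if i < lo or i > hi]
--     return arr
-- ===== Notes on version B (the rewrite author's own statement) =====
-- stated objective: faster
-- what changed: Replaces the nested shift-and-pop loops (one left-shift pass of the tail per removed element) with a single enumerate-and-filter pass that keeps the elements whose index lies outside [min(start,end), max(start,end)].
import Mathlib
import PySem

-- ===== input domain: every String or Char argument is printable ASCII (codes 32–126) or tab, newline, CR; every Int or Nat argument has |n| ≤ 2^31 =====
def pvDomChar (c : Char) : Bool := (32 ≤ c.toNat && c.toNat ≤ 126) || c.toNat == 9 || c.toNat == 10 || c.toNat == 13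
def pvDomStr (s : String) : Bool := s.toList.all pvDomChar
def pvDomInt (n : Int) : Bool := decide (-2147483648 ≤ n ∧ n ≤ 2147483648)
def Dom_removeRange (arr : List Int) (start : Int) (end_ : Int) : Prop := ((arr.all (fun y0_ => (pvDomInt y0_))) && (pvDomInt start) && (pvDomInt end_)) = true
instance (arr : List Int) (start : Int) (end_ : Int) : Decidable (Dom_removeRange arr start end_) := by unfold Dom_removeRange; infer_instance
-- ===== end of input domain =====

-- B replaces A's nested shift-and-pop loops by one enumerate-and-filter pass keeping indices outside
-- [min(start,end), max(start,end)]; both mutate the caller's list to the same contents, the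
-- equivalence proved here is about the return value.


-- ===== PORT A =====
def removeRange (arr : List Int) (start : Int) (end_ : Int) : Option (List Int) :=
  let p := if start ≤ end_ then (start, end_) else (end_, start)
  let s := p.1
  let e := p.2
  if s < 0 ∨ e > (arr.length : Int) - 1 then
    none
  else
    -- for i in range(start, end+1): for j in range(start, len(arr)-1): arr[j] = arr[j+1]; arr.pop()
    some ((PySem.List.pyRange s (e + 1) 1).foldl
      (fun a _ =>
        ((PySem.List.pyRange s ((a.length : Int) - 1) 1).foldl
          (fun b j => PySem.List.pySetD b j (PySem.List.pyGetD b (j + 1) 0)) a).dropLast)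
      arr)

-- ===== PORT B =====
def removeRange_alt (arr : List Int) (start : Int) (end_ : Int) : Option (List Int) :=
  let lo := min start end_
  let hi := max start end_
  if lo < 0 ∨ hi ≥ (arr.length : Int) then
    none
  else
    -- [x for i, x in enumerate(arr) if i < lo or i > hi]
    some ((PySem.List.enumerate arr).foldl
      (fun acc q => if q.1 < lo ∨ q.1 > hi then acc ++ [q.2] else acc) [])

-- ===== PRECONDITION & SPEC =====
def Spec_removeRange (arr : List Int) (start : Int) (end_ : Int) (out : Option (List Int)) : Prop := out = removeRange_alt arr start end_
instance (arr : List Int) (start : Int) (end_ : Int) (out : Option (List Int)) : Decidable (Spec_removeRange arr start end_ out) := by unfold Spec_removeRange; infer_instance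

-- ===== CLAIM (what is proved, stated in full; the proofs are below) =====
def Claim_equal_removeRange : Prop := ∀ (arr : List Int) (start : Int) (end_ : Int), Dom_removeRange arr start end_ → Spec_removeRange arr start end_ (removeRange arr start end_)

-- ===== LEMMAS AND PROOFS =====

-- ---- A side: the shift-and-pop loop nest removes the block [s, e] ----

-- the inner loop's body, over Nat indices
def natStep (b : List Int) (j : Nat) : List Int := b.set j (b.getD (j + 1) 0)

theorem natStep_length (b : List Int) (j : Nat) : (natStep b j).length = b.length := by
  simp [natStep]

theorem foldl_natStep_length (idxs : List Nat) (b : List Int) :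
    (idxs.foldl natStep b).length = b.length := by
  induction idxs generalizing b with
  | nil => rfl
  | cons j t ih => simp [List.foldl_cons, ih, natStep_length]

theorem natStep_cons (c : Int) (r : List Int) (j : Nat) :
    natStep (c :: r) (j + 1) = c :: natStep r j := by
  simp [natStep]

theorem cons_fold (c : Int) (r : List Int) (idxs : List Nat) :
    (idxs.map (· + 1)).foldl natStep (c :: r) = c :: idxs.foldl natStep r := by
  induction idxs generalizing r with
  | nil => rfl
  | cons j t ih => simp [List.foldl_cons, natStep_cons, ih]

-- the s = 0 shift: folding natStep over 0..len-2 then dropping the last element drops the head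
theorem shift_zero (l : List Int) :
    ((List.range (l.length - 1)).foldl natStep l).dropLast = l.drop 1 := by
  induction l with
  | nil => rfl
  | cons x t ih =>
    cases t with
    | nil => rfl
    | cons y t' =>
      have hr : List.range (t'.length + 1) = 0 :: (List.range t'.length).map (· + 1) := by
        simpa using List.range_succ_eq_map (n := t'.length)
      have hstep : natStep (x :: y :: t') 0 = y :: y :: t' := by simp [natStep]
      have hlen : ((List.range t'.length).foldl natStep (y :: t')).length = t'.length + 1 := by
        simp [foldl_natStep_length]
      have hne : (List.range t'.length).foldl natStep (y :: t') ≠ [] := by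
        intro h; rw [h] at hlen; simp at hlen
      have ih' : ((List.range ((y :: t').length - 1)).foldl natStep (y :: t')).dropLast
          = (y :: t').drop 1 := ih
      simp only [List.length_cons, Nat.add_sub_cancel] at ih' ⊢
      rw [hr, List.foldl_cons, hstep, cons_fold, List.dropLast_cons_of_ne_nil hne, ih']
      rfl

-- the general single removal at index s
theorem shift_at (s : Nat) (l : List Int) (h : s < l.length) :
    (((List.range (l.length - 1 - s)).map (fun k => s + k)).foldl natStep l).dropLast
      = l.take s ++ l.drop (s + 1) := by
  induction s generalizing l with
  | zero =>
    simpa using shift_zero l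
  | succ s ih =>
    cases l with
    | nil => simp at h
    | cons c r =>
      have h' : s < r.length := by simpa using Nat.lt_of_succ_lt_succ h
      have hmap : (List.range ((c :: r).length - 1 - (s + 1))).map (fun k => s + 1 + k)
          = ((List.range (r.length - 1 - s)).map (fun k => s + k)).map (· + 1) := by
        simp only [List.length_cons, List.map_map, Nat.add_sub_cancel]
        rw [show r.length - (s + 1) = r.length - 1 - s from by omega]
        apply List.map_congr_left
        intro k _
        simp [Function.comp]
        omega
      have hlen : (((List.range (r.length - 1 - s)).map (fun k => s + k)).foldl natStep r).length
          = r.length := foldl_natStep_length _ _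
      have hne : ((List.range (r.length - 1 - s)).map (fun k => s + k)).foldl natStep r ≠ [] := by
        intro hnil; rw [hnil] at hlen; simp at hlen; omega
      rw [hmap, cons_fold, List.dropLast_cons_of_ne_nil hne, ih r h']
      simp

-- iterate lemma: a fold whose body ignores the element is Function.iterate
theorem foldl_const {α β : Type} (g : α → α) (l : List β) (a : α) :
    l.foldl (fun x _ => g x) a = g^[l.length] a := by
  induction l generalizing a with
  | nil => rfl
  | cons b t ih => simp [List.foldl_cons, ih, Function.iterate_succ_apply]

-- one pass of A's outer body removes the element at index s
theorem outer_body (s : Nat) (a : List Int) (h : s < a.length) :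
    ((PySem.List.pyRange (s : Int) ((a.length : Int) - 1) 1).foldl
        (fun b j => PySem.List.pySetD b j (PySem.List.pyGetD b (j + 1) 0)) a).dropLast
      = a.take s ++ a.drop (s + 1) := by
  have hrange : PySem.List.pyRange (s : Int) ((a.length : Int) - 1) 1
      = (List.range (a.length - 1 - s)).map (fun k => ((s + k : Nat) : Int)) := by
    rw [PySem.List.pyRange_one]
    have : (((a.length : Int) - 1 - (s : Int))).toNat = a.length - 1 - s := by omega
    rw [this]
    apply List.map_congr_left
    intro k _
    push_cast
    ring
  rw [hrange, List.foldl_map]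
  have hstep : ∀ (b : List Int) (k : Nat),
      PySem.List.pySetD b ((s + k : Nat) : Int) (PySem.List.pyGetD b (((s + k : Nat) : Int) + 1) 0)
        = natStep b (s + k) := by
    intro b k
    have : ((s + k : Nat) : Int) + 1 = ((s + k + 1 : Nat) : Int) := by push_cast; ring
    rw [this, PySem.List.pySetD_natCast, PySem.List.pyGetD_natCast, natStep]
  have key := shift_at s a h
  rw [List.foldl_map] at key
  simp only [hstep]
  exact key

-- iterating the removal n times deletes the block [s, s+n)
theorem iterate_remove (s : Nat) (g : List Int → List Int)
    (hg : ∀ a : List Int, s < a.length → g a = a.take s ++ a.drop (s + 1)) :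
    ∀ (n : Nat) (a : List Int), s + n ≤ a.length →
      g^[n] a = a.take s ++ a.drop (s + n) := by
  intro n
  induction n with
  | zero => intro a _; simp
  | succ n ih =>
    intro a h
    have hs : s < a.length := by omega
    rw [Function.iterate_succ_apply, hg a hs]
    have hlen : (a.take s ++ a.drop (s + 1)).length = a.length - 1 := by
      simp; omega
    have h2 : s + n ≤ (a.take s ++ a.drop (s + 1)).length := by omega
    rw [ih _ h2]
    have hsle : s ≤ a.length := le_of_lt hs
    simp [List.drop_append, List.drop_drop, List.length_take, Nat.min_eq_left hsle]
    rw [List.drop_eq_nil_of_le (by simp [List.length_take]), List.nil_append,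
      show s + 1 + n = s + (n + 1) from by omega]

-- under the guard, A's loop nest deletes the block [s, e]
theorem a_branch (arr : List Int) (s e : Int) (hse : s ≤ e) (h0 : 0 ≤ s)
    (he : e ≤ (arr.length : Int) - 1) :
    (PySem.List.pyRange s (e + 1) 1).foldl
      (fun a _ => ((PySem.List.pyRange s ((a.length : Int) - 1) 1).foldl
        (fun b j => PySem.List.pySetD b j (PySem.List.pyGetD b (j + 1) 0)) a).dropLast) arr
      = arr.take s.toNat ++ arr.drop (e + 1).toNat := by
  obtain ⟨sn, rfl⟩ : ∃ sn : Nat, s = (sn : Int) := ⟨s.toNat, by omega⟩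
  rw [foldl_const, PySem.List.length_pyRange_one,
    iterate_remove sn _ (fun a ha => outer_body sn a ha) _ arr (by omega),
    show sn + ((e + 1 - (sn : Int))).toNat = (e + 1).toNat from by omega]
  simp

-- ---- B side: the enumerate filter keeps exactly take lo ++ drop (hi+1) ----

theorem enumerate_shift {α : Type} (t : List α) (s : Int) :
    PySem.List.enumerate t (s + 1) = (PySem.List.enumerate t s).map (fun p => (p.1 + 1, p.2)) := by
  induction t generalizing s with
  | nil => simp [PySem.List.enumerate_nil]
  | cons x r ih =>
    rw [PySem.List.enumerate_cons, PySem.List.enumerate_cons, List.map_cons, ih (s + 1)]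

theorem keep_eq (l : List Int) (lo hi : Int) (h : lo ≤ hi + 1) :
    ((PySem.List.enumerate l 0).filter (fun q => decide (q.1 < lo ∨ q.1 > hi))).map (·.2)
      = l.take lo.toNat ++ l.drop (hi + 1).toNat := by
  induction l generalizing lo hi with
  | nil => simp [PySem.List.enumerate_nil]
  | cons x t ih =>
    have ih' := ih (lo - 1) (hi - 1) (by omega)
    rw [PySem.List.enumerate_cons, enumerate_shift t 0, List.filter_cons]
    have htail : ((((PySem.List.enumerate t 0).map (fun p : Int × Int => (p.1 + 1, p.2))).filter
        (fun q : Int × Int => decide (q.1 < lo ∨ q.1 > hi))).map (fun q => q.2))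
        = t.take (lo - 1).toNat ++ t.drop ((hi - 1) + 1).toNat := by
      rw [List.filter_map, List.map_map]
      have h1 : ((fun q : Int × Int => decide (q.1 < lo ∨ q.1 > hi))
            ∘ (fun p : Int × Int => (p.1 + 1, p.2)))
          = (fun q : Int × Int => decide (q.1 < lo - 1 ∨ q.1 > hi - 1)) := by
        funext q; simp only [Function.comp_apply, decide_eq_decide]; omega
      have h2 : ((fun q : Int × Int => q.2) ∘ (fun p : Int × Int => (p.1 + 1, p.2)))
          = (fun q : Int × Int => q.2) := by funext q; rfl
      rw [h1, h2, ih']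
    by_cases hx : (0 : Int) < lo ∨ (0 : Int) > hi
    · rw [if_pos (by simpa using hx), List.map_cons, htail]
      rcases hx with hlo | hhi
      · obtain ⟨k, hk⟩ : ∃ k, lo.toNat = k + 1 := ⟨lo.toNat - 1, by omega⟩
        rw [hk, List.take_succ_cons,
          show (lo - 1).toNat = k from by omega,
          show ((hi - 1) + 1).toNat = hi.toNat from by omega,
          show (hi + 1).toNat = hi.toNat + 1 from by omega,
          List.drop_succ_cons, List.cons_append]
      · rw [show lo.toNat = 0 from by omega, show (lo - 1).toNat = 0 from by omega,
          show (hi + 1).toNat = 0 from by omega, show ((hi - 1) + 1).toNat = 0 from by omega]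
        simp
    · push Not at hx
      rw [if_neg (by simp only [decide_eq_true_iff, not_or, not_lt, gt_iff_lt]; exact ⟨hx.1, hx.2⟩),
        htail,
        show lo.toNat = 0 from by omega, show (lo - 1).toNat = 0 from by omega,
        show ((hi - 1) + 1).toNat = hi.toNat from by omega,
        show (hi + 1).toNat = hi.toNat + 1 from by omega]
      simp

-- under the guard, B's fold equals the same take/drop
theorem b_branch (arr : List Int) (lo hi : Int) (hlh : lo ≤ hi) (_h0 : 0 ≤ lo)
    (_hh : hi < (arr.length : Int)) :
    (PySem.List.enumerate arr).foldl
      (fun acc q => if q.1 < lo ∨ q.1 > hi then acc ++ [q.2] else acc) []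
      = arr.take lo.toNat ++ arr.drop (hi + 1).toNat := by
  rw [PySem.List.foldl_append_ite (p := fun q : Int × Int => q.1 < lo ∨ q.1 > hi)
    (f := fun q : Int × Int => q.2)]
  simpa using keep_eq arr lo hi (by omega)

-- ===== VERDICT (by name: the statement is the Claim_ definition above) =====
theorem removeRange_spec : Claim_equal_removeRange := by
  intro arr start end_ _
  unfold Spec_removeRange removeRange removeRange_alt
  by_cases hc : start ≤ end_
  · simp only [if_pos hc, min_eq_left hc, max_eq_right hc]
    by_cases hg : start < 0 ∨ end_ > (arr.length : Int) - 1
    · rw [if_pos hg, if_pos (by omega : start < 0 ∨ end_ ≥ (arr.length : Int))]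
    · push Not at hg
      rw [if_neg (by omega : ¬(start < 0 ∨ end_ > (arr.length : Int) - 1)),
        if_neg (by omega : ¬(start < 0 ∨ end_ ≥ (arr.length : Int))),
        a_branch arr start end_ hc hg.1 hg.2,
        b_branch arr start end_ hc hg.1 (by omega)]
  · have hc' : end_ ≤ start := le_of_not_ge hc
    simp only [if_neg hc, min_eq_right hc', max_eq_left hc']
    by_cases hg : end_ < 0 ∨ start > (arr.length : Int) - 1
    · rw [if_pos hg, if_pos (by omega : end_ < 0 ∨ start ≥ (arr.length : Int))]
    · push Not at hg
      rw [if_neg (by omega : ¬(end_ < 0 ∨ start > (arr.length : Int) - 1)),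
        if_neg (by omega : ¬(end_ < 0 ∨ start ≥ (arr.length : Int))),
        a_branch arr end_ start hc' hg.1 hg.2,
        b_branch arr end_ start hc' hg.1 (by omega)]
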